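-- pv_equiv track=rewrite | github.com/bogdan-nikitin/mc-book | __main__.py | split_words_and_newlines
-- ===== SOURCE A (Python) =====
-- def split_words_and_newlines(text):
--     parts = []
--     last_word = ''
--     newline = False
--     for char in text:
--         if char == ' ':
--             parts += [last_word]
--             last_word = ''
--             newline = False
--         elif char == '\n':
--             if not newline:
--                 parts += [last_word]
--                 last_word = ''
--             parts += ['\n']
--             newline = True
--         else:
--             last_word += char
--             newline = False
--     if not newline:
--         parts += [last_word]
--     return parts
-- ===== SOURCE B (Python) =====
-- def split_words_and_newlines(text):
--     pieces = text.split('\n')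
--     parts = pieces[0].split(' ')
--     for piece in pieces[1:]:
--         parts.append('\n')
--         if piece:
--             parts += piece.split(' ')
--     return parts
-- ===== Notes on version B (the rewrite author's own statement) =====
-- stated objective: faster
-- what changed: Replaces the char-by-char accumulator/state-machine with split-then-process: split the text once on newlines, split the first piece on spaces, and for each later piece emit a newline token followed by its space-split words (empty pieces, i.e. newline runs, contribute no word).
import Mathlib
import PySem

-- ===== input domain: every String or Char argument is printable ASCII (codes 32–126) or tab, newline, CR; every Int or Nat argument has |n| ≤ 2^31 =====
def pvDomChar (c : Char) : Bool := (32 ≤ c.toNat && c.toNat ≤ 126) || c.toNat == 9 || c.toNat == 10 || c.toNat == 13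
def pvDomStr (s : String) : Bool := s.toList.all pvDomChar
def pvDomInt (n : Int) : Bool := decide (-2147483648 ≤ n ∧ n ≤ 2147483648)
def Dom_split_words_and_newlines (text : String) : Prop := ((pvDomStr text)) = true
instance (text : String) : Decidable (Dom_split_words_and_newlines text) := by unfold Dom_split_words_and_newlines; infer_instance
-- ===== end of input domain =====

-- B rewrites A's character-level state machine as split-then-process (split on '\n', then on ' '); same return value, idiomatic decomposition.

-- ===== PORT A =====
-- char loop with state (parts, last_word, newline); last_word kept as List Char, flushed with String.ofList
def split_words_and_newlines (text : String) : List String :=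
  let r := text.toList.foldl
    (fun (st : List String × List Char × Bool) c =>
      if c = ' ' then (st.1 ++ [String.ofList st.2.1], [], false)
      else if c = '\n' then
        if st.2.2 = false then ((st.1 ++ [String.ofList st.2.1]) ++ ["\n"], [], true)
        else (st.1 ++ ["\n"], st.2.1, true)
      else (st.1, st.2.1 ++ [c], false))
    ([], [], false)
  if r.2.2 then r.1 else r.1 ++ [String.ofList r.2.1]

-- ===== PORT B =====
-- pieces = text.split('\n'); first piece split on ' '; each later piece contributes '\n' then its words (empty pieces skipped)
def split_words_and_newlines_alt (text : String) : List String :=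
  match PySem.Chars.splitOn text.toList ['\n'] with
  | [] => []   -- unreachable: str.split never returns an empty list
  | p0 :: rest =>
    rest.foldl
      (fun parts piece =>
        let parts := parts ++ ["\n"]
        if piece.isEmpty then parts
        else parts ++ (PySem.Chars.splitOn piece [' ']).map String.ofList)
      ((PySem.Chars.splitOn p0 [' ']).map String.ofList)

-- ===== PRECONDITION & SPEC =====
def Spec_split_words_and_newlines (text : String) (out : List String) : Prop := out = split_words_and_newlines_alt text
instance (text : String) (out : List String) : Decidable (Spec_split_words_and_newlines text out) := by unfold Spec_split_words_and_newlines; infer_instance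

-- ===== CLAIM (what is proved, stated in full; the proofs are below) =====
def Claim_equal_split_words_and_newlines : Prop := ∀ (text : String), Dom_split_words_and_newlines text → Spec_split_words_and_newlines text (split_words_and_newlines text)

-- ===== LEMMAS AND PROOFS =====

-- split on a single separator char, with an explicit prefix accumulator
def splitC (sep : Char) : List Char → List Char → List (List Char)
  | pre, [] => [pre]
  | pre, c :: t => if c = sep then pre :: splitC sep [] t else splitC sep (pre ++ [c]) t

-- the two states of A's machine, as recursive functions of the remaining input
mutual
def goW : List Char → List Char → List String
  | [], cur => [String.ofList cur]
  | c :: t, cur =>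
    if c = ' ' then String.ofList cur :: goW t []
    else if c = '\n' then String.ofList cur :: "\n" :: goN t
    else goW t (cur ++ [c])
def goN : List Char → List String
  | [] => []
  | c :: t =>
    if c = ' ' then "" :: goW t []
    else if c = '\n' then "\n" :: goN t
    else goW t [c]
end

def F (qs : List (List Char)) : List String :=
  qs.flatMap (fun q => "\n" :: if q = [] then [] else (splitC ' ' [] q).map String.ofList)

lemma splitC_ne_nil (sep : Char) (cs pre : List Char) : splitC sep pre cs ≠ [] := by
  induction cs generalizing pre with
  | nil => simp [splitC]
  | cons c t ih => simp only [splitC]; split_ifs <;> simp [ih]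

lemma splitC_prepend (sep : Char) (cs : List Char) : ∀ pre q r,
    splitC sep [] cs = q :: r → splitC sep pre cs = (pre ++ q) :: r := by
  induction cs with
  | nil => intro pre q r h; simp [splitC] at h ⊢; simp [h.1, h.2]
  | cons c t ih =>
    intro pre q r h
    by_cases hc : c = sep
    · simp [splitC, hc] at h ⊢
      exact ⟨by simp [← h.1], h.2⟩
    · simp only [splitC, if_neg hc] at h ⊢
      obtain ⟨q0, r0, h0⟩ : ∃ q0 r0, splitC sep [] t = q0 :: r0 := by
        cases hs : splitC sep [] t with
        | nil => exact absurd hs (splitC_ne_nil sep t [])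
        | cons a b => exact ⟨a, b, rfl⟩
      rw [show ([] : List Char) ++ [c] = [c] from rfl, ih [c] q0 r0 h0] at h
      injection h with h1 h2
      subst h2
      rw [ih (pre ++ [c]) q0 r0 h0, ← h1]
      simp

-- go_fuel: PySem.Chars.splitOn.go on a one-char separator computes splitC
lemma splitOn_go_eq (sep : Char) : ∀ fuel (l : List Char) (cur : List Char) (acc : List (List Char)), l.length < fuel →
    PySem.Chars.splitOn.go [sep] fuel l cur acc = acc.reverse ++ splitC sep cur.reverse l := by
  intro fuel
  induction fuel with
  | zero => intro l cur acc h; omega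
  | succ fuel ih =>
    intro l cur acc h
    cases l with
    | nil => rw [PySem.Chars.splitOn.go]; simp [splitC]; omega
    | cons c rest =>
      rw [PySem.Chars.splitOn.go]
      by_cases hc : c = sep
      · have hp : [sep].isPrefixOf (c :: rest) = true := by simp [List.isPrefixOf, hc]
        rw [if_pos hp]
        simp only [List.length_cons] at h
        rw [ih (List.drop [sep].length (c :: rest)) [] (cur.reverse :: acc) (by simp; omega)]
        simp [splitC, hc]
      · have hp : [sep].isPrefixOf (c :: rest) = false := by simp [List.isPrefixOf]; exact fun he => absurd he.symm hc
        rw [if_neg (by simp [hp])]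
        simp only [List.length_cons] at h
        rw [ih rest (c :: cur) acc (by omega)]
        simp [splitC, hc]

lemma splitOn_single (sep : Char) (cs : List Char) :
    PySem.Chars.splitOn cs [sep] = splitC sep [] cs := by
  rw [PySem.Chars.splitOn, splitOn_go_eq sep (cs.length + 1) cs [] [] (by omega)]
  simp

lemma MN (cs : List Char) :
    (∀ cur : List Char, ' ' ∉ cur → '\n' ∉ cur →
      goW cs cur = ((splitC ' ' cur (splitC '\n' [] cs).headI).map String.ofList)
        ++ F (splitC '\n' [] cs).tail)
    ∧ goN cs = (if (splitC '\n' [] cs).headI = [] then []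
          else ((splitC ' ' [] (splitC '\n' [] cs).headI).map String.ofList))
        ++ F (splitC '\n' [] cs).tail := by
  induction cs with
  | nil =>
    constructor
    · intro cur _ _; simp [goW, splitC, F]
    · simp [goN, splitC, F]
  | cons c t ih =>
    obtain ⟨q0, r0, hq⟩ : ∃ q0 r0, splitC '\n' [] t = q0 :: r0 := by
      cases hs : splitC '\n' [] t with
      | nil => exact absurd hs (splitC_ne_nil _ _ _)
      | cons a b => exact ⟨a, b, rfl⟩
    by_cases hsp : c = ' '
    · subst hsp
      have hsplit : splitC '\n' [] (' ' :: t) = (' ' :: q0) :: r0 := by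
        simp only [splitC, if_neg (by decide : ¬(' ' = '\n'))]
        exact splitC_prepend '\n' t [' '] q0 r0 hq
      rw [hsplit]
      constructor
      · intro cur h1 h2
        simp only [goW, List.headI, List.tail]
        rw [(ih.1 [] (by simp) (by simp)), hq]
        simp [splitC]
      · simp only [goN, List.headI, List.tail]
        rw [(ih.1 [] (by simp) (by simp)), hq]
        simp [splitC]
    · by_cases hnl : c = '\n'
      · subst hnl
        have hsplit : splitC '\n' [] ('\n' :: t) = [] :: q0 :: r0 := by
          simp only [splitC, hq]
          simp
        rw [hsplit]
        have hN := ih.2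
        rw [hq] at hN
        simp only [List.headI, List.tail] at hN
        constructor
        · intro cur h1 h2
          simp only [goW, if_neg (by decide : ¬('\n' = ' ')), List.headI, List.tail]
          rw [hN]
          simp [splitC, F]
        · simp only [goN, if_neg (by decide : ¬('\n' = ' ')), List.headI, List.tail]
          rw [hN]
          simp [F]
      · have hsplit : splitC '\n' [] (c :: t) = (c :: q0) :: r0 := by
          simp only [splitC, if_neg hnl]
          exact splitC_prepend '\n' t [c] q0 r0 hq
        rw [hsplit]
        constructor
        · intro cur h1 h2
          simp only [goW, if_neg hsp, if_neg hnl, List.headI, List.tail]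
          rw [ih.1 (cur ++ [c]) (by simpa [h1] using fun he => hsp he.symm) (by simpa [h2] using fun he => hnl he.symm), hq]
          simp only [List.headI, List.tail]
          have : splitC ' ' cur (c :: q0) = splitC ' ' (cur ++ [c]) q0 := by
            simp only [splitC, if_neg hsp]
          rw [this]
        · simp only [goN, if_neg hsp, if_neg hnl, List.headI, List.tail]
          rw [ih.1 [c] (by simpa using fun he => hsp he.symm) (by simpa using fun he => hnl he.symm), hq]
          simp only [List.headI, List.tail]
          have : splitC ' ' [] (c :: q0) = splitC ' ' [c] q0 := by
            simp only [splitC, if_neg hsp]; rfl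
          rw [if_neg (by simp), this]

def stepA (st : List String × List Char × Bool) (c : Char) : List String × List Char × Bool :=
  if c = ' ' then (st.1 ++ [String.ofList st.2.1], [], false)
  else if c = '\n' then
    if st.2.2 = false then ((st.1 ++ [String.ofList st.2.1]) ++ ["\n"], [], true)
    else (st.1 ++ ["\n"], st.2.1, true)
  else (st.1, st.2.1 ++ [c], false)

def finA (r : List String × List Char × Bool) : List String :=
  if r.2.2 then r.1 else r.1 ++ [String.ofList r.2.1]

lemma stepA_space (parts : List String) (cur : List Char) (nl : Bool) :
    stepA (parts, cur, nl) ' ' = (parts ++ [String.ofList cur], [], false) := by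
  simp [stepA]

lemma stepA_nl_false (parts : List String) (cur : List Char) :
    stepA (parts, cur, false) '\n' = ((parts ++ [String.ofList cur]) ++ ["\n"], [], true) := by
  simp [stepA]

lemma stepA_nl_true (parts : List String) (cur : List Char) :
    stepA (parts, cur, true) '\n' = (parts ++ ["\n"], cur, true) := by
  simp [stepA]

lemma stepA_other (parts : List String) (cur : List Char) (nl : Bool) (c : Char)
    (hsp : ¬c = ' ') (hnl : ¬c = '\n') :
    stepA (parts, cur, nl) c = (parts, cur ++ [c], false) := by
  simp [stepA, hsp, hnl]

lemma A_fold (cs : List Char) :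
    (∀ (parts : List String) (cur : List Char),
      finA (cs.foldl stepA (parts, cur, false)) = parts ++ goW cs cur)
    ∧ (∀ (parts : List String),
      finA (cs.foldl stepA (parts, [], true)) = parts ++ goN cs) := by
  induction cs with
  | nil =>
    constructor
    · intro parts cur; simp [goW, finA]
    · intro parts; simp [goN, finA]
  | cons c t ih =>
    refine ⟨fun parts cur => ?_, fun parts => ?_⟩
    · by_cases hsp : c = ' '
      · subst hsp
        rw [List.foldl_cons, stepA_space, ih.1]
        simp [goW]
      · by_cases hnl : c = '\n'
        · subst hnl
          rw [List.foldl_cons, stepA_nl_false, ih.2]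
          simp [goW, hsp]
        · rw [List.foldl_cons, stepA_other parts cur false c hsp hnl, ih.1]
          simp [goW, hsp, hnl]
    · by_cases hsp : c = ' '
      · subst hsp
        rw [List.foldl_cons, stepA_space, ih.1]
        simp [goN]
      · by_cases hnl : c = '\n'
        · subst hnl
          rw [List.foldl_cons, stepA_nl_true, ih.2]
          simp [goN]
        · rw [List.foldl_cons, stepA_other parts [] true c hsp hnl, ih.1]
          simp [goN, hsp, hnl]

lemma B_fold (rest : List (List Char)) : ∀ parts0 : List String,
    rest.foldl
      (fun parts piece =>
        let parts := parts ++ ["\n"]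
        if piece.isEmpty then parts
        else parts ++ (PySem.Chars.splitOn piece [' ']).map String.ofList)
      parts0 = parts0 ++ F rest := by
  induction rest with
  | nil => intro parts0; simp [F]
  | cons q r ih =>
    intro parts0
    simp only [List.foldl_cons]
    rw [ih]
    by_cases hq : q = []
    · subst hq; simp [F]
    · rw [if_neg (by simpa using hq)]
      simp [F, hq, splitOn_single]

-- ===== VERDICT (by name: the statement is the Claim_ definition above) =====
theorem split_words_and_newlines_spec : Claim_equal_split_words_and_newlines := by
  intro text _
  show split_words_and_newlines text = split_words_and_newlines_alt text
  have hAeq : split_words_and_newlines text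
      = finA (text.toList.foldl stepA ([], [], false)) := rfl
  rw [hAeq, (A_fold text.toList).1 [] []]
  unfold split_words_and_newlines_alt
  rw [splitOn_single]
  obtain ⟨q0, r0, hq⟩ : ∃ q0 r0, splitC '\n' [] text.toList = q0 :: r0 := by
    cases hs : splitC '\n' [] text.toList with
    | nil => exact absurd hs (splitC_ne_nil _ _ _)
    | cons a b => exact ⟨a, b, rfl⟩
  rw [hq]
  dsimp only
  rw [B_fold, (MN text.toList).1 [] (by simp) (by simp), hq]
  simp [splitOn_single]
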